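-- pv_equiv track=rewrite | github.com/mohammadfaiizan/ProjectI | DSA/Problem/Graph/01_Graph_Fundamentals_Representations/Advanced_Graph_Construction.py | construct_complement_graph
-- ===== SOURCE A (Python) =====
-- from typing import List, Dict, Set, Tuple, Optional, Union
--
-- def construct_complement_graph(n: int, edges: List[List[int]]) -> List[List[int]]:
--     """
--     Problem: Construct complement graph
--
--     Build complement where edges exist iff they don't exist in original.
--
--     Time: O(N² + E)
--     Space: O(N² + E)
--     """
--     edge_set = set()
--     for u, v in edges:
--         edge_set.add(tuple(sorted([u, v])))
--
--     complement_edges = []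
--     for i in range(n):
--         for j in range(i + 1, n):
--             if (i, j) not in edge_set:
--                 complement_edges.append([i, j])
--
--     return complement_edges
-- ===== SOURCE B (Python) =====
-- def construct_complement_graph(n, edges):
--     """Sort-then-merge: collect the normalized in-range edges, sort them, then
--     emit the lexicographic candidate stream while one global pointer skips the
--     present edges (no per-pair membership test)."""
--     present = []
--     for u, v in edges:
--         lo, hi = min(u, v), max(u, v)
--         if 0 <= lo < hi < n:
--             present.append((lo, hi))
--     present = sorted(set(present))
--     out = []
--     k = 0
--     for i in range(n):
--         for j in range(i + 1, n):
--             if k < len(present) and present[k] == (i, j):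
--                 k += 1
--             else:
--                 out.append([i, j])
--     return out
-- ===== Notes on version B (the rewrite author's own statement) =====
-- stated objective: alternative
-- what changed: Replaces the hash-set membership test per candidate pair by a sort-then-merge scan: normalized in-range edges are sorted once and a single global pointer walks them in step with the lexicographic candidate stream, so no set lookup happens inside the loops.
import Mathlib
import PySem

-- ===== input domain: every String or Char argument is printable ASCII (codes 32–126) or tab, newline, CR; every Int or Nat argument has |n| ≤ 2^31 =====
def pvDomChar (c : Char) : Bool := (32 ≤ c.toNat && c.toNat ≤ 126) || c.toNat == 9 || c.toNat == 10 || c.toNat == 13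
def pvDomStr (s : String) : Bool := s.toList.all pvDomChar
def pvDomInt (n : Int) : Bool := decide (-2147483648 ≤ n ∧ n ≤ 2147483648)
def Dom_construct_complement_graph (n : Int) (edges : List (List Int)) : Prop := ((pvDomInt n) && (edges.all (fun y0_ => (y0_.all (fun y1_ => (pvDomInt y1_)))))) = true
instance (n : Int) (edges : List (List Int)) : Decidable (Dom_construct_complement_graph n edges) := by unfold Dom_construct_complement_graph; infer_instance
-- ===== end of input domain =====

-- B replaces A's per-pair set membership test by sort-then-merge: the normalized in-range
-- edges are sorted once and one global pointer skips them while the candidate pairs are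
-- emitted in order; same values, a different algorithm of similar cost.


-- ===== PORT A =====
-- tuple(sorted([u, v])); the `_ => (0, 0)` arm is unreachable under Pre_ (Python raises ValueError unpacking)
def pvSortPair2 (e : List Int) : Int × Int :=
  match e with
  | [u, v] => if v < u then (v, u) else (u, v)
  | _ => (0, 0)

def construct_complement_graph (n : Int) (edges : List (List Int)) : List (List Int) :=
  let edge_set : PySem.Set (Int × Int) :=
    edges.foldl (fun s e => PySem.Set.add s (pvSortPair2 e)) PySem.Set.empty
  (PySem.List.pyRange 0 n).foldl (fun acc i =>
    (PySem.List.pyRange (i + 1) n).foldl (fun acc j =>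
      if PySem.Set.contains edge_set (i, j) then acc else acc ++ [[i, j]]) acc) []

-- ===== PORT B =====
-- lo, hi = min(u, v), max(u, v); the `_ => (0, 0)` arm is unreachable under Pre_ (ValueError)
def pvNormPair (e : List Int) : Int × Int :=
  match e with
  | [u, v] => (min u v, max u v)
  | _ => (0, 0)

def construct_complement_graph_alt (n : Int) (edges : List (List Int)) : List (List Int) :=
  let presentList : List (Int × Int) :=
    edges.foldl (fun acc e =>
      if 0 ≤ (pvNormPair e).1 ∧ (pvNormPair e).1 < (pvNormPair e).2 ∧ (pvNormPair e).2 < n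
      then acc ++ [pvNormPair e] else acc) []
  let present : List (Int × Int) :=
    PySem.List.sorted2 (PySem.Set.ofList presentList) (fun p => p.1) (fun p => p.2)
  ((PySem.List.pyRange 0 n).foldl (fun st i =>
    (PySem.List.pyRange (i + 1) n).foldl (fun (st : Nat × List (List Int)) j =>
      if st.1 < present.length ∧ present.getD st.1 (0, 0) = (i, j)
      then (st.1 + 1, st.2)
      else (st.1, st.2 ++ [[i, j]])) st)
    ((0 : Nat), ([] : List (List Int)))).2

-- ===== PRECONDITION & SPEC =====
-- Pre_ excludes edges whose length is not 2: there 'for u, v in edges' raises ValueError (both A and B).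
def Pre_construct_complement_graph (n : Int) (edges : List (List Int)) : Prop :=
  ∀ e ∈ edges, e.length = 2
instance (n : Int) (edges : List (List Int)) : Decidable (Pre_construct_complement_graph n edges) := by unfold Pre_construct_complement_graph; infer_instance

def pvWitness_construct_complement_graph : Int × List (List Int) := (4, [[0, 1], [2, 3], [1, 1]])

def Spec_construct_complement_graph (n : Int) (edges : List (List Int)) (out : List (List Int)) : Prop := out = construct_complement_graph_alt n edges
instance (n : Int) (edges : List (List Int)) (out : List (List Int)) : Decidable (Spec_construct_complement_graph n edges out) := by unfold Spec_construct_complement_graph; infer_instance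

-- ===== CLAIM (what is proved, stated in full; the proofs are below) =====
def Claim_equal_construct_complement_graph : Prop := ∀ (n : Int) (edges : List (List Int)), Dom_construct_complement_graph n edges → Pre_construct_complement_graph n edges → Spec_construct_complement_graph n edges (construct_complement_graph n edges)

-- ===== LEMMAS AND PROOFS =====

-- strict and non-strict lexicographic order on pairs (Python's tuple comparison)
def pvLex (a b : Int × Int) : Prop := a.1 < b.1 ∨ (a.1 = b.1 ∧ a.2 < b.2)
def pvLe (a b : Int × Int) : Prop := a.1 < b.1 ∨ (a.1 = b.1 ∧ a.2 ≤ b.2)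

-- the candidate-pair list, in the loops' order
def pvAllPairs (n : Int) : List (Int × Int) :=
  (PySem.List.pyRange 0 n).flatMap (fun i =>
    (PySem.List.pyRange (i + 1) n).map (fun j => (i, j)))

theorem pvAllPairs_pairwise (n : Int) : (pvAllPairs n).Pairwise pvLex := by
  unfold pvAllPairs
  apply List.pairwise_flatMap.mpr
  constructor
  · intro i hi
    rw [List.pairwise_map]
    exact (PySem.List.pairwise_lt_pyRange_one _ _).imp (fun h => Or.inr ⟨rfl, h⟩)
  · refine (PySem.List.pairwise_lt_pyRange_one 0 n).imp_of_mem ?_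
    intro i i' _ _ hlt a ha b hb
    simp only [List.mem_map] at ha hb
    obtain ⟨j, -, rfl⟩ := ha
    obtain ⟨j', -, rfl⟩ := hb
    exact Or.inl hlt

theorem mem_pvAllPairs (n : Int) (p : Int × Int) :
    p ∈ pvAllPairs n ↔ 0 ≤ p.1 ∧ p.1 < p.2 ∧ p.2 < n := by
  obtain ⟨a, b⟩ := p
  unfold pvAllPairs
  simp only [List.mem_flatMap, List.mem_map, PySem.List.mem_pyRange_one, Prod.mk.injEq]
  constructor
  · rintro ⟨i, ⟨h1, h2⟩, j, ⟨h3, h4⟩, rfl, rfl⟩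
    exact ⟨h1, by omega, h4⟩
  · rintro ⟨h1, h2, h3⟩
    exact ⟨a, ⟨h1, by omega⟩, b, ⟨by omega, h3⟩, rfl, rfl⟩

-- A's nested loop, flattened into filter/map form
theorem pvA_eq (n : Int) (es : PySem.Set (Int × Int)) :
    (PySem.List.pyRange 0 n).foldl (fun acc i =>
      (PySem.List.pyRange (i + 1) n).foldl (fun acc j =>
        if PySem.Set.contains es (i, j) then acc else acc ++ [[i, j]]) acc) [] =
    ((pvAllPairs n).filter (fun p => !PySem.Set.contains es p)).map (fun p => [p.1, p.2]) := by
  have hin : ∀ (i : Int) (acc : List (List Int)),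
      (PySem.List.pyRange (i + 1) n).foldl (fun acc j =>
        if PySem.Set.contains es (i, j) then acc else acc ++ [[i, j]]) acc =
      acc ++ ((PySem.List.pyRange (i + 1) n).filter
        (fun j => !PySem.Set.contains es (i, j))).map (fun j => [i, j]) := by
    intro i acc
    rw [show (fun acc j => if PySem.Set.contains es (i, j) then acc else acc ++ [[i, j]]) =
        (fun (acc : List (List Int)) j => if (!PySem.Set.contains es (i, j)) = true
          then acc ++ [[i, j]] else acc) by
      funext acc j; cases h : PySem.Set.contains es (i, j) <;> simp_all]
    exact PySem.List.foldl_append_if _ _ _ _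
  refine Eq.trans (PySem.List.foldl_congr_mem _ _ (fun acc i => acc ++
        ((PySem.List.pyRange (i + 1) n).filter
          (fun j => !PySem.Set.contains es (i, j))).map (fun j => [i, j])) _
      (fun acc i _ => hin i acc)) ?_
  rw [PySem.List.foldl_append_eq_flatMap, List.nil_append]
  unfold pvAllPairs
  rw [List.filter_flatMap, List.map_flatMap]
  congr 1
  funext i
  rw [List.filter_map, List.map_map]
  rfl

-- lex-boolean used by sorted2 with keys fst, snd
def pvLexB (a b : Int × Int) : Bool :=
  decide (a.1 < b.1) || (!decide (b.1 < a.1) && decide (a.2 < b.2))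

theorem pvLexB_true {a b : Int × Int} (h : pvLexB a b = true) : pvLe a b := by
  unfold pvLexB at h; unfold pvLe
  simp only [Bool.or_eq_true, Bool.and_eq_true, Bool.not_eq_true', decide_eq_true_eq,
    decide_eq_false_iff_not] at h
  omega

theorem pvLexB_false {a b : Int × Int} (h : pvLexB a b = false) : pvLe b a := by
  unfold pvLexB at h; unfold pvLe
  simp only [Bool.or_eq_false_iff, Bool.and_eq_false_iff, Bool.not_eq_false',
    decide_eq_true_eq, decide_eq_false_iff_not] at h
  omega

theorem pvLe_trans {a b c : Int × Int} (h1 : pvLe a b) (h2 : pvLe b c) : pvLe a c := by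
  unfold pvLe at *; omega

theorem pvInsertBy_pairwise (x : Int × Int) (ys : List (Int × Int)) (h : ys.Pairwise pvLe) :
    (PySem.List.insertBy pvLexB x ys).Pairwise pvLe := by
  induction ys with
  | nil => simp [PySem.List.insertBy]
  | cons y ys ih =>
    rw [List.pairwise_cons] at h
    by_cases hb : pvLexB x y = true
    · rw [show PySem.List.insertBy pvLexB x (y :: ys) = x :: y :: ys by
        simp [PySem.List.insertBy, hb]]
      refine List.pairwise_cons.mpr ⟨?_, List.pairwise_cons.mpr h⟩
      intro z hz
      rcases List.mem_cons.mp hz with rfl | hz'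
      · exact pvLexB_true hb
      · exact pvLe_trans (pvLexB_true hb) (h.1 z hz')
    · rw [show PySem.List.insertBy pvLexB x (y :: ys) = y :: PySem.List.insertBy pvLexB x ys by
        simp [PySem.List.insertBy, hb]]
      refine List.pairwise_cons.mpr ⟨?_, ih h.2⟩
      intro z hz
      rcases (PySem.List.mem_insertBy _ _ _ _).mp hz with rfl | hz'
      · exact pvLexB_false (by simpa using hb)
      · exact h.1 z hz'

theorem pvSorted2_pairwise (xs : List (Int × Int)) :
    (PySem.List.sorted2 xs (fun p => p.1) (fun p => p.2)).Pairwise pvLe := by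
  unfold PySem.List.sorted2
  simp only [if_neg (by decide : ¬ (false = true))]
  induction xs using List.reverseRecOn with
  | nil => simp
  | append_singleton ys x ih =>
    rw [List.foldl_append, List.foldl_cons, List.foldl_nil]
    exact pvInsertBy_pairwise x _ ih

theorem pvLe_ne_lex {a b : Int × Int} (h1 : pvLe a b) (h2 : a ≠ b) : pvLex a b := by
  unfold pvLe at h1; unfold pvLex
  rcases h1 with h | ⟨h, h'⟩
  · exact Or.inl h
  · refine Or.inr ⟨h, lt_of_le_of_ne h' ?_⟩
    intro he; exact h2 (Prod.ext h he)

theorem pvLex_ne {a b : Int × Int} (h : pvLex a b) : a ≠ b := by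
  rintro rfl; unfold pvLex at h; omega

theorem pvLex_asymm {a b : Int × Int} (h1 : pvLex a b) (h2 : pvLex b a) : False := by
  unfold pvLex at *; omega

-- THE MERGE LEMMA: walking a pvLex-sorted stream js with a pointer into a pvLex-sorted
-- list bs (whose pending elements all occur in js) collects exactly js minus bs.
theorem pvMerge (bs : List (Int × Int)) (hbs : bs.Pairwise pvLex) :
    ∀ (js : List (Int × Int)), js.Pairwise pvLex → ∀ (k : Nat) (out : List (List Int)),
    (∀ e ∈ bs.drop k, e ∈ js) →
    (js.foldl (fun (st : Nat × List (List Int)) p =>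
        if st.1 < bs.length ∧ bs.getD st.1 (0, 0) = p
        then (st.1 + 1, st.2) else (st.1, st.2 ++ [[p.1, p.2]])) (k, out)).2
    = out ++ (js.filter (fun p => !(bs.drop k).contains p)).map (fun p => [p.1, p.2]) := by
  intro js
  induction js with
  | nil => intro _ k out _; simp
  | cons j js ih =>
    intro hjs k out hmem
    rw [List.pairwise_cons] at hjs
    have hgetD : bs.getD k (0, 0) = ((bs.drop k).head?).getD (0, 0) := by
      rw [List.head?_drop, List.getD_eq_getElem?_getD]
    cases hdk : bs.drop k with
    | nil =>
      have hk : ¬ k < bs.length := by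
        have := List.drop_eq_nil_iff.mp hdk; omega
      rw [List.foldl_cons, if_neg (by intro h; exact hk h.1)]
      rw [ih hjs.2 k (out ++ [[j.1, j.2]]) (by rw [hdk]; intro e he; cases he)]
      simp [hdk]
    | cons d dk' =>
      have hk : k < bs.length := by
        by_contra hk
        rw [List.drop_eq_nil_iff.mpr (by omega)] at hdk; cases hdk
      have hget : bs.getD k (0, 0) = d := by rw [hgetD, hdk]; rfl
      have hdkpw : (bs.drop k).Pairwise pvLex := hbs.drop
      by_cases hd : d = j
      · subst hd
        rw [List.foldl_cons, if_pos ⟨hk, hget⟩]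
        have hdrop1 : bs.drop (k + 1) = dk' := by
          rw [← List.drop_drop (j := k) (i := 1), hdk]; rfl
        rw [ih hjs.2 (k + 1) out ?hm]
        case hm =>
          intro e he
          have hed : e ∈ bs.drop k := by rw [hdk]; exact List.mem_cons_of_mem _ (hdrop1 ▸ he)
          have hlex : pvLex d e := by
            rw [hdk] at hdkpw
            exact (List.pairwise_cons.mp hdkpw).1 e (hdrop1 ▸ he)
          rcases List.mem_cons.mp (hmem e hed) with rfl | h
          · exact absurd hlex (fun h => pvLex_ne h rfl)
          · exact h
        rw [hdrop1]
        congr 1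
        rw [List.filter_cons]
        simp only [List.contains_cons, BEq.rfl, Bool.true_or, Bool.not_true]
        rw [if_neg (by decide : ¬ (false = true))]
        apply congrArg
        apply List.filter_congr
        intro p hp
        have hne : p ≠ d := (pvLex_ne (hjs.1 p hp)).symm
        simp [hne]
      · rw [List.foldl_cons, if_neg (by rintro ⟨-, h⟩; rw [hget] at h; exact hd h)]
        have hjnot : j ∉ bs.drop k := by
          intro hj
          rw [hdk] at hj
          rcases List.mem_cons.mp hj with rfl | hj'
          · exact hd rfl
          · -- j strictly after d in bs, but d ∈ js after j: asymmetry
            have h1 : pvLex d j := by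
              rw [hdk] at hdkpw
              exact (List.pairwise_cons.mp hdkpw).1 j hj'
            have hdj : d ∈ j :: js := hmem d (by rw [hdk]; exact List.mem_cons_self)
            rcases List.mem_cons.mp hdj with rfl | hd'
            · exact hd rfl
            · exact pvLex_asymm h1 (hjs.1 d hd')
        rw [ih hjs.2 k (out ++ [[j.1, j.2]]) ?hm2]
        case hm2 =>
          intro e he
          rcases List.mem_cons.mp (hmem e he) with rfl | h
          · exact absurd he hjnot
          · exact h
        have hjnot' : j ∉ d :: dk' := hdk ▸ hjnot
        rw [List.filter_cons, if_pos (by simpa using hjnot')]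
        simp only [List.map_cons, List.append_assoc, List.singleton_append]
        rw [hdk]

-- membership in A's edge set and in B's present list agree on in-range pairs
theorem pvPair_eq (e : List Int) : pvSortPair2 e = pvNormPair e := by
  unfold pvSortPair2 pvNormPair
  match e with
  | [] => rfl
  | [u] => rfl
  | u :: v :: w :: t => rfl
  | [u, v] =>
    show (if v < u then (v, u) else (u, v)) = (min u v, max u v)
    rcases lt_or_ge v u with h | h
    · rw [if_pos h, min_eq_right (by omega), max_eq_left (by omega)]
    · rw [if_neg (by omega), min_eq_left h, max_eq_right h]

-- B's nested loop, flattened into a single fold over the candidate-pair list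
theorem pvB_eq (n : Int) (present : List (Int × Int)) :
    ((PySem.List.pyRange 0 n).foldl (fun st i =>
      (PySem.List.pyRange (i + 1) n).foldl (fun (st : Nat × List (List Int)) j =>
        if st.1 < present.length ∧ present.getD st.1 (0, 0) = (i, j)
        then (st.1 + 1, st.2)
        else (st.1, st.2 ++ [[i, j]])) st)
      ((0 : Nat), ([] : List (List Int)))) =
    (pvAllPairs n).foldl (fun (st : Nat × List (List Int)) p =>
      if st.1 < present.length ∧ present.getD st.1 (0, 0) = p
      then (st.1 + 1, st.2) else (st.1, st.2 ++ [[p.1, p.2]])) ((0 : Nat), []) := by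
  unfold pvAllPairs
  rw [List.foldl_flatMap]
  simp only [List.foldl_map]

-- A's edge set, expressed as a set-of-list
theorem pvEs_eq (edges : List (List Int)) :
    edges.foldl (fun s e => PySem.Set.add s (pvSortPair2 e)) PySem.Set.empty
    = PySem.Set.ofList (edges.map pvSortPair2) := by
  rw [PySem.Set.ofList_eq_foldl, List.foldl_map]
  rfl

-- ===== VERDICT (by name: the statement is the Claim_ definition above) =====
theorem construct_complement_graph_spec : Claim_equal_construct_complement_graph := by
  intro n edges _ _
  unfold Spec_construct_complement_graph construct_complement_graph construct_complement_graph_alt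
  simp only []
  rw [pvEs_eq edges]
  set es := PySem.Set.ofList (edges.map pvSortPair2) with hes
  rw [pvA_eq n es]
  rw [PySem.List.foldl_append_ite (p := fun e =>
    0 ≤ (pvNormPair e).1 ∧ (pvNormPair e).1 < (pvNormPair e).2 ∧ (pvNormPair e).2 < n)
    (f := pvNormPair), List.nil_append]
  set presentList := (edges.filter (fun e => decide
    (0 ≤ (pvNormPair e).1 ∧ (pvNormPair e).1 < (pvNormPair e).2 ∧ (pvNormPair e).2 < n))).map
    pvNormPair with hpl
  set present := PySem.List.sorted2 (PySem.Set.ofList presentList)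
    (fun p => p.1) (fun p => p.2) with hpr
  have hmemp : ∀ p, p ∈ present ↔ (∃ e ∈ edges, pvNormPair e = p ∧
      0 ≤ p.1 ∧ p.1 < p.2 ∧ p.2 < n) := by
    intro p
    rw [(PySem.List.sorted2_perm _ _ _ _).mem_iff, PySem.Set.mem_ofList, hpl]
    simp only [List.mem_map, List.mem_filter, decide_eq_true_eq]
    constructor
    · rintro ⟨e, ⟨he, hc⟩, rfl⟩; exact ⟨e, he, rfl, hc⟩
    · rintro ⟨e, he, rfl, hc⟩; exact ⟨e, ⟨he, hc⟩, rfl⟩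
  have hnd : present.Nodup :=
    ((PySem.List.sorted2_perm _ _ _ _).nodup_iff).mpr (PySem.Set.nodup_ofList _)
  have hpw : present.Pairwise pvLex := by
    have h1 := pvSorted2_pairwise (PySem.Set.ofList presentList)
    rw [← hpr] at h1
    exact (h1.and hnd).imp (fun h => pvLe_ne_lex h.1 h.2)
  have hsub : ∀ e ∈ present, e ∈ pvAllPairs n := by
    intro e he
    rcases (hmemp e).mp he with ⟨_, _, _, hc⟩
    exact (mem_pvAllPairs n e).mpr hc
  rw [pvB_eq n present,
    pvMerge present hpw (pvAllPairs n) (pvAllPairs_pairwise n) 0 []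
      (by rw [List.drop_zero]; exact hsub),
    List.nil_append, List.drop_zero]
  apply congrArg
  apply List.filter_congr
  intro p hp
  obtain ⟨h1, h2, h3⟩ := (mem_pvAllPairs n p).mp hp
  apply congrArg
  rw [Bool.eq_iff_iff, PySem.Set.contains_iff, hes, PySem.Set.mem_ofList,
    List.contains_iff_mem, hmemp p]
  simp only [List.mem_map]
  constructor
  · rintro ⟨e, he, rfl⟩
    exact ⟨e, he, (pvPair_eq e).symm, h1, h2, h3⟩
  · rintro ⟨e, he, rfl, -⟩
    exact ⟨e, he, pvPair_eq e⟩
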